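-- pv_equiv track=rewrite | github.com/menga52/Gerrymandering | src/classes/state.py | findDistricts
-- ===== SOURCE A (Python) =====
-- def findDistricts(district_matrix):
-- 	"""
-- 	This function searches through a state to identify which precincts belong to which district
-- 	inputs:
-- 	districts - a two-dimensional array of district numbers where districts[i][j] = k means (i, j) is in district k
--
-- 	outputs:
-- 	precincts - a dictionary whose keys districts and whose values are lists of coordianates
-- 	"""
-- 	precincts = {}
-- 	for i in range(len(district_matrix)):
-- 		for j in range(len(district_matrix[i])):
-- 			if district_matrix[i][j] not in precincts:
-- 				precincts[district_matrix[i][j]] = []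
-- 			precincts[district_matrix[i][j]].append((i, j))
-- 	return precincts
-- ===== SOURCE B (Python) =====
-- def findDistricts(district_matrix):
-- 	"""Alternative decomposition: flatten the matrix into (district, coord) cells,
-- 	take the district keys in first-occurrence order, and build each group by a
-- 	per-key scan of the flat cell list."""
-- 	cells = [(v, (i, j)) for i, row in enumerate(district_matrix) for j, v in enumerate(row)]
-- 	keys = list(dict.fromkeys(v for v, _ in cells))
-- 	return {k: [c for v, c in cells if v == k] for k in keys}
-- ===== Notes on version B (the rewrite author's own statement) =====
-- stated objective: alternative
-- what changed: A builds the dict in one pass with membership checks and in-place appends; B flattens the matrix into (district, coord) cells, deduplicates the keys in first-occurrence order, and constructs each group by filtering the flat cell list per key.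
import Mathlib
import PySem

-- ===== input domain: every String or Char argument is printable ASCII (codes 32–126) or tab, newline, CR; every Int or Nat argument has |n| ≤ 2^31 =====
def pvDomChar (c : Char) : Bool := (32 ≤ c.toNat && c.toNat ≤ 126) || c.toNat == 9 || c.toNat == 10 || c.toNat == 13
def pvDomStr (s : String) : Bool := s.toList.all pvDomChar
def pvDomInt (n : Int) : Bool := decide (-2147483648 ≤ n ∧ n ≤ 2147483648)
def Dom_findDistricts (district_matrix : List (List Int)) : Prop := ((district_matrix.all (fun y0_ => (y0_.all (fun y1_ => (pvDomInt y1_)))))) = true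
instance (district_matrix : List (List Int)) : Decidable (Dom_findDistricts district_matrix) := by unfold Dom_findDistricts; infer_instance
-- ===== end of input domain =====

-- B groups the cells by a different decomposition (flat cell list + key dedup + per-key filter)
-- instead of A's single pass building a dict in place; same return value, objective: alternative.

-- ===== PORT A =====
def findDistricts (district_matrix : List (List Int)) : List (Int × List (Int × Int)) :=
  (List.foldl (fun d i =>
      let row := PySem.List.pyGetD district_matrix i []
      List.foldl (fun d j =>
          let k := PySem.List.pyGetD row j 0
          let d' := if d.contains k then d else d.insert k ([] : List (Int × Int))
          d'.modify k [] (fun l => l ++ [(i, j)]))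
        d (PySem.List.pyRange 0 (PySem.List.len row)))
    PySem.Dict.empty (PySem.List.pyRange 0 (PySem.List.len district_matrix))).items

-- ===== PORT B =====
-- the flat cell list [(district, (i, j)), …] in row-major order (B's first comprehension)
def pvCells (m : List (List Int)) : List (Int × (Int × Int)) :=
  (PySem.List.enumerate m).flatMap (fun p => (PySem.List.enumerate p.2).map (fun q => (q.2, (p.1, q.1))))

def findDistricts_alt (district_matrix : List (List Int)) : List (Int × List (Int × Int)) :=
  let cells := pvCells district_matrix
  let keys := PySem.List.dedup (cells.map (fun c => c.1))
  keys.map (fun k => (k, (cells.filter (fun c => c.1 == k)).map (fun c => c.2)))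

-- ===== PRECONDITION & SPEC =====
def Spec_findDistricts (district_matrix : List (List Int)) (out : List (Int × List (Int × Int))) : Prop := out = findDistricts_alt district_matrix
instance (district_matrix : List (List Int)) (out : List (Int × List (Int × Int))) : Decidable (Spec_findDistricts district_matrix out) := by unfold Spec_findDistricts; infer_instance

-- ===== CLAIM (what is proved, stated in full; the proofs are below) =====
def Claim_equal_findDistricts : Prop := ∀ (district_matrix : List (List Int)), Dom_findDistricts district_matrix → Spec_findDistricts district_matrix (findDistricts district_matrix)

-- ===== LEMMAS AND PROOFS =====

-- A's "if key absent, insert []; then append" collapses to a plain modify-with-default.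
theorem stepA_eq (d : PySem.Dict Int (List (Int × Int))) (k : Int) (c : Int × Int) :
    (if d.contains k then d else d.insert k []).modify k [] (fun l => l ++ [c])
      = d.modify k [] (fun l => l ++ [c]) := by
  by_cases h : d.contains k = true
  · simp [h]
  · rw [Bool.not_eq_true] at h
    simp only [h, Bool.false_eq_true, if_false]
    have hall : ∀ p ∈ d.items, (p.1 == k) = false := by
      have hh := h; simp only [PySem.Dict.contains, List.any_eq_false] at hh
      intro p hp; simpa using hh p hp
    simp only [PySem.Dict.modify, PySem.Dict.getD_insert_self,
      PySem.Dict.getD_of_not_contains d [] h]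
    have h1 : (d.insert k ([] : List (Int × Int))).items = d.items ++ [(k, [])] :=
      PySem.Dict.items_insert_of_not_contains d _ h
    have h2 : ((d.insert k ([] : List (Int × Int))).insert k ([] ++ [c])).items
        = d.items ++ [(k, [] ++ [c])] := by
      rw [PySem.Dict.items_insert_of_contains _ _ (PySem.Dict.contains_insert_self d k []), h1,
        List.map_append]
      have hm : d.items.map (fun p => if (p.1 == k) = true then (k, ([] : List (Int × Int)) ++ [c]) else p) = d.items := by
        refine (List.map_congr_left (fun x hx => ?_)).trans (List.map_id d.items)
        simp [hall x hx]
      rw [hm]; simp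
    have h3 : (d.insert k (([] : List (Int × Int)) ++ [c])).items = d.items ++ [(k, [] ++ [c])] :=
      PySem.Dict.items_insert_of_not_contains d _ h
    cases hA : (d.insert k ([] : List (Int × Int))).insert k ([] ++ [c]) with
    | mk l1 =>
      cases hB : d.insert k (([] : List (Int × Int)) ++ [c]) with
      | mk l2 =>
        rw [hA] at h2; rw [hB] at h3
        simp only [PySem.Dict.mk.injEq]
        exact h2.trans h3.symm

theorem foldl_flatMap' {α β σ : Type} (l : List α) (g : α → List β) (f : σ → β → σ) (b : σ) :
    (l.flatMap g).foldl f b = l.foldl (fun b x => (g x).foldl f b) b := by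
  induction l generalizing b with
  | nil => rfl
  | cons x xs ih => simp [List.flatMap_cons, List.foldl_append, ih]

-- A's nested index loops are one fold of a modify-step over the flat cell list.
theorem fold_eq (m : List (List Int)) :
    findDistricts m = ((pvCells m).foldl (fun d p => d.modify p.1 [] (fun l => l ++ [p.2])) PySem.Dict.empty).items := by
  unfold findDistricts pvCells
  rw [foldl_flatMap']
  rw [PySem.List.enumerate_eq_map_pyRange m [], List.foldl_map]
  congr 1
  apply PySem.List.foldl_congr_mem
  intro acc i hi
  rw [List.foldl_map, PySem.List.enumerate_eq_map_pyRange _ (0:Int), List.foldl_map]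
  apply PySem.List.foldl_congr_mem
  intro acc2 j hj
  exact stepA_eq _ _ _

-- a dict with nodup keys is its key list paired with the looked-up values
theorem items_eq_map_keys (d : PySem.Dict Int (List (Int × Int))) (h : d.keys.Nodup) :
    d.items = d.keys.map (fun k => (k, d.getD k [])) := by
  simp only [PySem.Dict.keys, List.map_map]
  refine (List.map_id d.items).symm.trans (List.map_congr_left ?_)
  intro p hp
  have := PySem.Dict.getD_of_mem_items d (k := p.1) (v := p.2) (by simpa using hp) h ([] : List (Int × Int))
  simp [Function.comp, this]

theorem main_eq (m : List (List Int)) : findDistricts m = findDistricts_alt m := by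
  rw [fold_eq]
  set cells := pvCells m with hc
  have hkeys : ((cells.foldl (fun d p => d.modify p.1 [] (fun l => l ++ [p.2])) PySem.Dict.empty)).keys
      = PySem.Set.ofList (cells.map (fun c => c.1)) := by
    rw [PySem.Dict.keys_foldl_modify_key cells Prod.fst [] (fun _ p => (fun l => l ++ [p.2])) PySem.Dict.empty]
    simp [PySem.Dict.keys_empty, PySem.Set.update, PySem.Set.ofList]
  have hnodup : ((cells.foldl (fun d p => d.modify p.1 [] (fun l => l ++ [p.2])) PySem.Dict.empty)).keys.Nodup := by
    rw [hkeys]; exact PySem.Set.nodup_ofList _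
  rw [items_eq_map_keys _ hnodup, hkeys]
  show _ = findDistricts_alt m
  unfold findDistricts_alt
  simp only [PySem.List.dedup_eq_ofList, ← hc]
  apply List.map_congr_left
  intro k hk
  rw [PySem.Dict.getD_foldl_modify_append]
  simp [PySem.Dict.getD_empty]

-- ===== VERDICT (by name: the statement is the Claim_ definition above) =====
theorem findDistricts_spec : Claim_equal_findDistricts := by
  intro m _
  unfold Spec_findDistricts
  exact main_eq m
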